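-- pv_equiv track=rewrite | github.com/edpowers/multiuse | multiuse/validation/pandas_lib/null_values_utils.py | remove_null_elements
-- ===== SOURCE A (Python) =====
-- import copy
--
-- def remove_null_elements(nested_list: list, null_indices: list) -> list:
--     """
--     Remove null elements from a nested list based on provided indices.
--
--     Parameters:
--     nested_list (list): The input nested list
--     null_indices (list): List of tuples containing indices of null elements
--
--     Returns:
--     list: A new nested list with null elements removed
--     """
--
--     def remove_at_index(lst, index):
--         if len(index) == 1:
--             if isinstance(lst, list) and 0 <= index[0] < len(lst):
--                 del lst[index[0]]
--         elif isinstance(lst, list) and 0 <= index[0] < len(lst):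
--             remove_at_index(lst[index[0]], index[1:])
--         return lst
--
--     # Sort indices in reverse order to avoid shifting problems
--     sorted_indices = sorted(null_indices, key=lambda x: x[0], reverse=True)
--
--     # Create a deep copy of the original list to avoid modifying it
--     result = copy.deepcopy(nested_list)
--
--     for index in sorted_indices:
--         remove_at_index(result, index)
--
--     return result
-- ===== SOURCE B (Python) =====
-- import copy
--
-- def remove_null_elements(nested_list: list, null_indices: list) -> list:
--     """Iterative-descent rewrite: walk each index path with an explicit cursor
--     instead of recursing, guarding each step; delete at the last component."""
--     result = copy.deepcopy(nested_list)
--     for path in sorted(null_indices, key=lambda p: p[0], reverse=True):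
--         node = result
--         ok = True
--         for i in path[:-1]:
--             if isinstance(node, list) and 0 <= i < len(node):
--                 node = node[i]
--             else:
--                 ok = False
--                 break
--         last = path[-1]
--         if ok and isinstance(node, list) and 0 <= last < len(node):
--             del node[last]
--     return result
-- ===== Notes on version B (the rewrite author's own statement) =====
-- stated objective: alternative
-- what changed: Replaces the recursive remove_at_index helper with an iterative guarded descent: an explicit cursor walks each index path (breaking on a failed isinstance/range guard) and deletes at the last component.
import Mathlib
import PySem

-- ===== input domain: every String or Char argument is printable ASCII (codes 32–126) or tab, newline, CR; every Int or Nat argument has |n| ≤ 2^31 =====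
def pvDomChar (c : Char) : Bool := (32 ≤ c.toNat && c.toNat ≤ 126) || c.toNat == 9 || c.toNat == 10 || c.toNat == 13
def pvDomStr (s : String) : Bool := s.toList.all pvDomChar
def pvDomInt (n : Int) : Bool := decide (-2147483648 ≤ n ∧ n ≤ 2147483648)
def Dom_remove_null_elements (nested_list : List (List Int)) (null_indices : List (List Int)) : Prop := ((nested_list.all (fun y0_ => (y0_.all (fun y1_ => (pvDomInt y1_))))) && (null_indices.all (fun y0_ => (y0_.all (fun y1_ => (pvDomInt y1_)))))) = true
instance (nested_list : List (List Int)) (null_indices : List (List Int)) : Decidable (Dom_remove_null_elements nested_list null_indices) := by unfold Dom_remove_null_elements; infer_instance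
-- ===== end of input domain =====

-- B replaces A's recursive remove_at_index with an iterative guarded descent (explicit cursor/zipper);
-- equivalence is about the RETURN value (both Pythons mutate only their own deep copy).

-- ===== PORT A =====
-- A's recursive remove_at_index, written per nesting level because Lean's types fix the depth.
-- Level of a bare int: `isinstance(lst, list)` is False in both branches, so nothing happens.
def removeAtInt (x : Int) (_index : List Int) : Int := x

def removeAtInner (lst : List Int) (index : List Int) : List Int :=
  let i := index.headD 0  -- index[0]; index is nonempty on every input Pre_ admits
  if index.length = 1 then
    if 0 ≤ i ∧ i < (lst.length : Int) then lst.eraseIdx i.toNat else lst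
  else if 0 ≤ i ∧ i < (lst.length : Int) then
    -- remove_at_index(lst[index[0]], index[1:]) "mutates" an immutable int: no effect on lst
    let _ := removeAtInt (lst.getD i.toNat 0) index.tail
    lst
  else lst

def removeAtOuter (lst : List (List Int)) (index : List Int) : List (List Int) :=
  let i := index.headD 0
  if index.length = 1 then
    if 0 ≤ i ∧ i < (lst.length : Int) then lst.eraseIdx i.toNat else lst
  else if 0 ≤ i ∧ i < (lst.length : Int) then
    -- the recursive call mutates lst[index[0]] in place
    lst.set i.toNat (removeAtInner (lst.getD i.toNat []) index.tail)
  else lst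

def remove_null_elements (nested_list : List (List Int)) (null_indices : List (List Int)) : List (List Int) :=
  let sorted_indices := PySem.List.sorted null_indices (fun x => x.headD 0) true
  sorted_indices.foldl (fun result index => removeAtOuter result index) nested_list

-- ===== PORT B =====
-- B's iterative descent: the cursor `node` is the root, an inner list (with its position in the
-- root kept for write-back), or a non-list leaf; a failed guard kills the cursor (`none` = break).
inductive PvNode where
  | outer : List (List Int) → PvNode
  | inner : Nat → List Int → PvNode
  | leaf : PvNode
deriving DecidableEq, Repr

def pvStep (node : Option PvNode) (i : Int) : Option PvNode :=
  match node with
  | some (PvNode.outer l) =>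
      if 0 ≤ i ∧ i < (l.length : Int) then some (PvNode.inner i.toNat (l.getD i.toNat [])) else none
  | some (PvNode.inner _ l) =>
      if 0 ≤ i ∧ i < (l.length : Int) then some PvNode.leaf else none
  | some PvNode.leaf => none
  | none => none

def pvApplyPath (res : List (List Int)) (path : List Int) : List (List Int) :=
  let last := path.getLast?.getD 0  -- path[-1]; path is nonempty on every input Pre_ admits
  match path.dropLast.foldl pvStep (some (PvNode.outer res)) with
  | some (PvNode.outer l) => if 0 ≤ last ∧ last < (l.length : Int) then l.eraseIdx last.toNat else res
  | some (PvNode.inner i l) => if 0 ≤ last ∧ last < (l.length : Int) then res.set i (l.eraseIdx last.toNat) else res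
  | _ => res

def remove_null_elements_alt (nested_list : List (List Int)) (null_indices : List (List Int)) : List (List Int) :=
  (PySem.List.sorted null_indices (fun p => p.headD 0) true).foldl pvApplyPath nested_list

-- ===== PRECONDITION & SPEC =====
-- Pre_ excludes exactly the inputs with an empty index path, on which Python A raises IndexError
-- (`x[0]` in the sort key); B raises there too.
def Pre_remove_null_elements (nested_list : List (List Int)) (null_indices : List (List Int)) : Prop :=
  ∀ p ∈ null_indices, p ≠ []
instance (nested_list : List (List Int)) (null_indices : List (List Int)) : Decidable (Pre_remove_null_elements nested_list null_indices) := by unfold Pre_remove_null_elements; infer_instance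
def pvWitness_remove_null_elements : List (List Int) × List (List Int) := ([[1, 2], [3]], [[0, 1], [1]])

def Spec_remove_null_elements (nested_list : List (List Int)) (null_indices : List (List Int)) (out : List (List Int)) : Prop := out = remove_null_elements_alt nested_list null_indices
instance (nested_list : List (List Int)) (null_indices : List (List Int)) (out : List (List Int)) : Decidable (Spec_remove_null_elements nested_list null_indices out) := by unfold Spec_remove_null_elements; infer_instance

-- ===== CLAIM (what is proved, stated in full; the proofs are below) =====
def Claim_equal_remove_null_elements : Prop := ∀ (nested_list : List (List Int)) (null_indices : List (List Int)), Dom_remove_null_elements nested_list null_indices → Pre_remove_null_elements nested_list null_indices → Spec_remove_null_elements nested_list null_indices (remove_null_elements nested_list null_indices)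

-- ===== LEMMAS AND PROOFS =====

-- once the cursor is dead (`none`) or sits on a non-list leaf, it stays dead or on the leaf
theorem pvFoldl_dead (l : List Int) (s : Option PvNode)
    (h : s = none ∨ s = some PvNode.leaf) :
    l.foldl pvStep s = none ∨ l.foldl pvStep s = some PvNode.leaf := by
  induction l generalizing s with
  | nil => simpa using h
  | cons x xs ih =>
      rcases h with h | h <;> subst h <;> simp [List.foldl_cons, pvStep] <;> exact ih _ (Or.inl rfl)

-- per-path agreement of A's recursion and B's descent, for a nonempty path
theorem removeAtOuter_eq_pvApplyPath (res : List (List Int)) (p : List Int) (hp : p ≠ []) :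
    removeAtOuter res p = pvApplyPath res p := by
  match p with
  | [] => exact absurd rfl hp
  | [i] =>
      simp [removeAtOuter, pvApplyPath]
  | i :: j :: rest =>
      have hlen : (i :: j :: rest).length ≠ 1 := by simp
      by_cases hg : 0 ≤ i ∧ i < (res.length : Int)
      · have hi : i.toNat < res.length := by omega
        have hget : res.getD i.toNat [] = res[i.toNat] := List.getD_eq_getElem res [] hi
        match rest with
        | [] =>
            simp [removeAtOuter, pvApplyPath, List.foldl_cons, pvStep, hg, removeAtInner]
            split_ifs <;> simp [List.set_getElem_self]
        | r :: rs =>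
            have hinner : removeAtInner res[i.toNat] (j :: r :: rs) = res[i.toNat] := by
              simp [removeAtInner]
            have hdead0 : pvStep (pvStep (some (PvNode.outer res)) i) j = none ∨
                pvStep (pvStep (some (PvNode.outer res)) i) j = some PvNode.leaf := by
              simp [pvStep, hg]
              omega
            rcases pvFoldl_dead (r :: rs).dropLast _ hdead0 with hd | hd <;>
              simp [removeAtOuter, pvApplyPath, List.foldl_cons, hg, hinner, hd,
                List.set_getElem_self]
      · have h2 : pvStep (some (PvNode.outer res)) i = none := by simp [pvStep, hg]
        rcases pvFoldl_dead (j :: rest).dropLast none (Or.inl rfl) with hd | hd <;>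
          simp [removeAtOuter, pvApplyPath, hg, List.foldl_cons, h2, hd]

-- ===== VERDICT (by name: the statement is the Claim_ definition above) =====
theorem remove_null_elements_spec : Claim_equal_remove_null_elements := by
  intro nested_list null_indices _ hpre
  unfold Spec_remove_null_elements remove_null_elements remove_null_elements_alt
  refine PySem.List.foldl_congr_mem _ _ _ _ ?_
  intro acc p hp
  exact removeAtOuter_eq_pvApplyPath acc p
    (hpre p ((PySem.List.mem_sorted _ _ _ _).mp hp))
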